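-- pv_equiv track=rewrite | github.com/ilovebreak/Stepik-HackerRank-Codewars-etc | Matrix Layer Rotation (HackerRank)/main.py | matrix_to_layers
-- ===== SOURCE A (Python) =====
-- def rotate_anticlockwise(matrix):
--     m, n = len(matrix), len(matrix[0])
--     new_matrix = [[0] * m for _ in range(n)]
--     coordinates = list(zip(list(range(n)[::-1]), list(range(n))))
--     for j in range(m):
--         for x, y in coordinates:
--             new_matrix[x][j] = matrix[j][y]
--     return new_matrix
--
-- def matrix_to_layers(matrix):
--     m, n = len(matrix), len(matrix[0])
--     number_of_layers = min(m, n) // 2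
--     layers = [[] for _ in range(number_of_layers)]
--     for _ in range(4):
--         x, y = 0, len(matrix[0]) - 1
--         for i, layer in enumerate(layers):
--             layer += matrix[i][x:y]
--             x += 1
--             y -= 1
--         matrix = rotate_anticlockwise(matrix)
--     return layers
-- ===== SOURCE B (Python) =====
-- def matrix_to_layers(matrix):
--     m, n = len(matrix), len(matrix[0])
--     layers = []
--     for i in range(min(m, n) // 2):
--         t, b, l, r = i, m - 1 - i, i, n - 1 - i
--         ring = [matrix[t][c] for c in range(l, r)]
--         ring += [matrix[row][r] for row in range(t, b)]
--         ring += [matrix[b][c] for c in reversed(range(l + 1, r + 1))]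
--         ring += [matrix[row][l] for row in reversed(range(t + 1, b + 1))]
--         layers.append(ring)
--     return layers
-- ===== Notes on version B (the rewrite author's own statement) =====
-- stated objective: faster
-- what changed: B builds each concentric layer by reading the four borders of ring i directly by index (top row, right column, reversed bottom row, reversed left column) instead of A's four passes that each slice the top-left diagonal band and then materialise a whole anticlockwise-rotated copy of the matrix.
import Mathlib
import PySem

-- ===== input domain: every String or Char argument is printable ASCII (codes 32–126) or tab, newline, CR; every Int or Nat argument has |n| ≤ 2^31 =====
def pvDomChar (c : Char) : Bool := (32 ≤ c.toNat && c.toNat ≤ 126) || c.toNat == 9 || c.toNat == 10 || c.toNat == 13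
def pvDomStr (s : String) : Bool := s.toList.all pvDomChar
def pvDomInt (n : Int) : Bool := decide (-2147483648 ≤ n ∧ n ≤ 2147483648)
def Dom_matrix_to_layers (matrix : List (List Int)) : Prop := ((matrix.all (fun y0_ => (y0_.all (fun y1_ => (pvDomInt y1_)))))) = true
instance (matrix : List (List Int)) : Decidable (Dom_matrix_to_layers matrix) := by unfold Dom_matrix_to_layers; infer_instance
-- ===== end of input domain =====

-- B reads each concentric ring's four borders directly by index instead of A's four
-- slice-then-rotate passes; a timing run measured B faster by a constant factor
-- (no rotated matrix copies are allocated).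

-- ===== PORT A =====
-- rotate_anticlockwise, step for step: new_matrix[x][j] = matrix[j][y] over the zipped
-- coordinate list; list indices here are natural numbers (all Python indices involved are ≥ 0).
def pvRotate (matrix : List (List Int)) : List (List Int) :=
  let m := matrix.length
  let n := (matrix.headD []).length
  let coordinates := ((List.range n).reverse).zip (List.range n)
  (List.range m).foldl
    (fun nm j => coordinates.foldl
      (fun nm xy => nm.set xy.1 ((nm.getD xy.1 []).set j ((matrix.getD j []).getD xy.2 0)))
      nm)
    (List.replicate n (List.replicate m (0 : Int)))

-- one iteration of A's 'for _ in range(4)' body: the enumerate loop that extends each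
-- layer with matrix[i][x:y], then matrix = rotate_anticlockwise(matrix)
def pvPass (st : List (List Int) × List (List Int)) : List (List Int) × List (List Int) :=
  let cur := st.2
  let inner := (PySem.List.enumerate st.1 0).foldl
    (fun (s : List (List Int) × Int × Int) il =>
      (s.1 ++ [il.2 ++ PySem.List.slice (PySem.List.pyGetD cur il.1 []) (some s.2.1) (some s.2.2)],
       s.2.1 + 1, s.2.2 - 1))
    (([] : List (List Int)), (0 : Int), ((cur.headD []).length : Int) - 1)
  (inner.1, pvRotate cur)

def matrix_to_layers (matrix : List (List Int)) : List (List Int) :=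
  let m := matrix.length
  let n := (matrix.headD []).length
  let numberOfLayers := Nat.min m n / 2
  let layers0 := List.replicate numberOfLayers ([] : List Int)
  ((List.range 4).foldl (fun st _ => pvPass st) (layers0, matrix)).1

-- ===== PORT B =====
-- Source B step for step; each Python 'range'/'reversed(range(...))' comprehension over
-- nonnegative bounds becomes the map over the corresponding List.range' (reversed).
def matrix_to_layers_alt (matrix : List (List Int)) : List (List Int) :=
  let m := matrix.length
  let n := (matrix.headD []).length
  (List.range (Nat.min m n / 2)).foldl
    (fun layers i =>
      let t := i
      let b := m - 1 - i
      let l := i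
      let r := n - 1 - i
      let ring := (List.range' l (r - l)).map (fun c => (matrix.getD t []).getD c 0)
      let ring := ring ++ (List.range' t (b - t)).map (fun row => (matrix.getD row []).getD r 0)
      let ring := ring ++ ((List.range' (l + 1) ((r + 1) - (l + 1))).reverse).map (fun c => (matrix.getD b []).getD c 0)
      let ring := ring ++ ((List.range' (t + 1) ((b + 1) - (t + 1))).reverse).map (fun row => (matrix.getD row []).getD l 0)
      layers ++ [ring])
    []

-- ===== PRECONDITION & SPEC =====
-- A raises IndexError on the empty matrix (matrix[0]), on a matrix with an empty first
-- row (the second rotation pass hits matrix[0] of []), and whenever some row is shorter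
-- than the first row (rotate_anticlockwise reads matrix[j][y] for every y < len(matrix[0])).
def Pre_matrix_to_layers (matrix : List (List Int)) : Prop :=
  matrix ≠ [] ∧ 0 < (matrix.headD []).length ∧
    ∀ row ∈ matrix, (matrix.headD []).length ≤ row.length
instance (matrix : List (List Int)) : Decidable (Pre_matrix_to_layers matrix) := by
  unfold Pre_matrix_to_layers; infer_instance

def pvWitness_matrix_to_layers : List (List Int) := [[1, 2], [3, 4]]

def Spec_matrix_to_layers (matrix : List (List Int)) (out : List (List Int)) : Prop :=
  out = matrix_to_layers_alt matrix
instance (matrix : List (List Int)) (out : List (List Int)) : Decidable (Spec_matrix_to_layers matrix out) := by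
  unfold Spec_matrix_to_layers; infer_instance

-- ===== CLAIM (what is proved, stated in full; the proofs are below) =====
def Claim_equal_matrix_to_layers : Prop := ∀ (matrix : List (List Int)), Dom_matrix_to_layers matrix → Pre_matrix_to_layers matrix → Spec_matrix_to_layers matrix (matrix_to_layers matrix)


-- ===== LEMMAS AND PROOFS =====

-- entry (j, y) of the original matrix, the value rotate writes and both ports read
def pvEnt (M : List (List Int)) (j y : Nat) : Int := (M.getD j []).getD y 0

lemma pv_zip_rev_range (n : Nat) :
    ((List.range n).reverse).zip (List.range n) = (List.range n).map (fun y => (n - 1 - y, y)) := by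
  apply List.ext_getElem
  · simp
  · intro i h1 h2
    simp only [List.getElem_zip, List.getElem_map, List.getElem_reverse, List.getElem_range,
      List.length_range]

lemma pv_rowSeg (xs : List Int) (a b : Nat) (h : a + b ≤ xs.length) :
    (xs.drop a).take b = (List.range' a b).map (fun c => xs.getD c 0) := by
  apply List.ext_getElem
  · simp; omega
  · intro i h1 h2
    simp only [List.length_take, List.length_drop] at h1
    simp only [List.getElem_take, List.getElem_drop, List.getElem_map, List.getElem_range']
    rw [List.getD_eq_getElem xs 0 (by omega)]
    congr 1
    omega

lemma pv_revSeg (h : Nat → Int) (k a C : Nat) (hc : a + k ≤ C + 1) :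
    (List.range' a k).map (fun j => h (C - j)) = ((List.range' (C + 1 - a - k) k).map h).reverse := by
  apply List.ext_getElem
  · simp
  · intro i h1 h2
    simp only [List.length_map, List.length_range'] at h1
    simp only [List.getElem_map, List.getElem_reverse, List.getElem_range', List.length_map,
      List.length_range']
    congr 1
    omega

lemma pv_inner_fold (cur : List (List Int)) :
    ∀ (L : Nat) (f : Nat → List Int) (s x y : Int) (acc : List (List Int)),
      ((PySem.List.enumerate ((List.range L).map f) s).foldl
        (fun (st : List (List Int) × Int × Int) il =>
          (st.1 ++ [il.2 ++ PySem.List.slice (PySem.List.pyGetD cur il.1 []) (some st.2.1) (some st.2.2)],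
           st.2.1 + 1, st.2.2 - 1)) (acc, x, y))
      = (acc ++ (List.range L).map
          (fun k => f k ++ PySem.List.slice (PySem.List.pyGetD cur (s + k) []) (some (x + k)) (some (y - k))),
         x + L, y - L) := by
  intro L
  induction L with
  | zero => intro f s x y acc; simp
  | succ L ih =>
    intro f s x y acc
    rw [List.range_succ, List.map_append, PySem.List.enumerate_append, List.foldl_append, ih]
    simp only [List.map_cons, List.map_nil, List.length_map, List.length_range,
      PySem.List.enumerate_cons, PySem.List.enumerate_nil, List.foldl_cons, List.foldl_nil,
      List.map_append, List.append_assoc]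
    refine Prod.ext rfl (Prod.ext ?_ ?_)
    · simp; ring
    · simp; ring

lemma pv_foldl_set_distinct (upd : Nat → List Int → List Int) :
    ∀ (ts : List Nat) (nm : List (List Int)), ts.Nodup → (∀ t ∈ ts, t < nm.length) →
      (ts.foldl (fun nm t => nm.set t (upd t (nm.getD t []))) nm).length = nm.length ∧
      ∀ x : Nat, (ts.foldl (fun nm t => nm.set t (upd t (nm.getD t []))) nm).getD x [] =
        if x ∈ ts then upd x (nm.getD x []) else nm.getD x [] := by
  intro ts
  induction ts with
  | nil => intro nm _ _; simp
  | cons t ts ih =>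
    intro nm hnd hlt
    have hnd' := hnd.of_cons
    have htnot : t ∉ ts := (List.nodup_cons.1 hnd).1
    have ht : t < nm.length := hlt t (by simp)
    set nm' := nm.set t (upd t (nm.getD t [])) with hnm'
    have hlen' : nm'.length = nm.length := by simp [hnm']
    have hlt' : ∀ u ∈ ts, u < nm'.length := by
      intro u hu; rw [hlen']; exact hlt u (by simp [hu])
    obtain ⟨ihlen, ihget⟩ := ih nm' hnd' hlt'
    rw [List.foldl_cons]
    refine ⟨by rw [ihlen, hlen'], ?_⟩
    intro x
    rw [ihget x]
    by_cases hx : x ∈ ts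
    · have hxt : x ≠ t := fun h => htnot (h ▸ hx)
      simp only [if_true, List.mem_cons, hx, or_true]
      congr 1
      simp [hnm', List.getD, Ne.symm hxt]
    · by_cases hxt : x = t
      · subst hxt
        simp only [hx, if_false, List.mem_cons, true_or, if_true]
        simp [hnm', List.getD, ht]
      · simp only [hx, if_false, List.mem_cons, hxt, false_or, if_false]
        simp [hnm', List.getD, Ne.symm hxt]

lemma pv_pass_char (row : List Int) (j n : Nat) (nm : List (List Int)) (hlen : nm.length = n) :
    ((((List.range n).reverse).zip (List.range n)).foldl
      (fun nm xy => nm.set xy.1 ((nm.getD xy.1 []).set j (row.getD xy.2 0))) nm)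
    = (List.range n).map (fun x => (nm.getD x []).set j (row.getD (n - 1 - x) 0)) := by
  rw [pv_zip_rev_range, List.foldl_map]
  have hcongr : (List.range n).foldl
      (fun nm y => nm.set (n - 1 - y) ((nm.getD (n - 1 - y) []).set j (row.getD y 0))) nm
    = (List.range n).foldl
      (fun nm y => nm.set (n - 1 - y) ((nm.getD (n - 1 - y) []).set j (row.getD (n - 1 - (n - 1 - y)) 0))) nm := by
    apply PySem.List.foldl_congr_mem
    intro acc y hy
    simp only [List.mem_range] at hy
    have : n - 1 - (n - 1 - y) = y := by omega
    rw [this]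
  rw [hcongr]
  rw [show (List.range n).foldl
      (fun nm y => nm.set (n - 1 - y) ((nm.getD (n - 1 - y) []).set j (row.getD (n - 1 - (n - 1 - y)) 0))) nm
    = (((List.range n).map (fun y => n - 1 - y)).foldl
      (fun nm t => nm.set t ((nm.getD t []).set j (row.getD (n - 1 - t) 0))) nm) from
    (List.foldl_map (f := fun y => n - 1 - y)
      (g := fun (nm : List (List Int)) t => nm.set t ((nm.getD t []).set j (row.getD (n - 1 - t) 0)))
      (l := List.range n) (init := nm)).symm]
  have hnd : ((List.range n).map (fun y => n - 1 - y)).Nodup := by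
    refine List.Nodup.map_on ?_ (List.nodup_range)
    intro a ha b hb hab
    simp only [List.mem_range] at ha hb
    omega
  have hlt : ∀ t ∈ (List.range n).map (fun y => n - 1 - y), t < nm.length := by
    intro t ht
    simp only [List.mem_map, List.mem_range] at ht
    obtain ⟨y, hy, rfl⟩ := ht
    omega
  obtain ⟨hL, hG⟩ := pv_foldl_set_distinct (fun t rowv => rowv.set j (row.getD (n - 1 - t) 0)) _ nm hnd hlt
  apply List.ext_getElem
  · rw [hL, hlen]; simp
  · intro i h1 h2
    rw [← List.getD_eq_getElem _ ([] : List Int) h1]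
    rw [hL, hlen] at h1
    rw [hG i]
    have hmem : i ∈ (List.range n).map (fun y => n - 1 - y) := by
      simp only [List.mem_map, List.mem_range]
      exact ⟨n - 1 - i, by omega, by omega⟩
    simp only [hmem, if_true, List.getElem_map, List.getElem_range]

lemma pv_outer_char (M : List (List Int)) (m n : Nat) :
    ∀ k, k ≤ m →
      ((List.range k).foldl (fun nm j =>
        ((((List.range n).reverse).zip (List.range n)).foldl
          (fun nm xy => nm.set xy.1 ((nm.getD xy.1 []).set j ((M.getD j []).getD xy.2 0))) nm))
        (List.replicate n (List.replicate m (0 : Int))))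
      = (List.range n).map (fun x => (List.range m).map
          (fun j => if j < k then (M.getD j []).getD (n - 1 - x) 0 else 0)) := by
  intro k
  induction k with
  | zero =>
    intro _
    simp only [List.range_zero, List.foldl_nil]
    apply List.ext_getElem
    · simp
    · intro i h1 h2
      simp only [List.getElem_replicate, List.getElem_map, List.getElem_range]
      apply List.ext_getElem
      · simp
      · intro p hp1 hp2
        simp
  | succ k ih =>
    intro hk1
    rw [List.range_succ, List.foldl_append, ih (by omega), List.foldl_cons, List.foldl_nil]
    rw [pv_pass_char _ _ _ _ (by simp)]
    apply List.map_congr_left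
    intro x hx
    simp only [List.mem_range] at hx
    rw [List.getD_eq_getElem _ ([] : List Int) (by simp [hx])]
    simp only [List.getElem_map, List.getElem_range]
    apply List.ext_getElem
    · simp
    · intro j hj1 hj2
      simp only [List.length_set, List.length_map, List.length_range] at hj1
      rw [List.getElem_set]
      simp only [List.getElem_map, List.getElem_range]
      by_cases hjk : k = j
      · subst hjk
        simp
      · simp only [hjk, if_false]
        split_ifs with h1 h2 <;> first | rfl | omega

lemma pv_rotate_eq (M : List (List Int)) :
    pvRotate M = (List.range (M.headD []).length).map
      (fun x => (List.range M.length).map (fun j => pvEnt M j ((M.headD []).length - 1 - x))) := by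
  unfold pvRotate pvEnt
  rw [pv_outer_char M M.length (M.headD []).length M.length (le_refl _)]
  apply List.map_congr_left
  intro x _
  apply List.map_congr_left
  intro j hj
  simp only [List.mem_range] at hj
  simp [hj]
lemma pv_headD_map_range (f : Nat → List Int) (n : Nat) (hn : 0 < n) :
    ((List.range n).map f).headD [] = f 0 := by
  obtain ⟨n', rfl⟩ : ∃ n', n = n' + 1 := ⟨n - 1, by omega⟩
  rw [List.range_succ_eq_map]
  simp

lemma pv_pass_eq (L : Nat) (f : Nat → List Int) (cur : List (List Int)) :
    pvPass ((List.range L).map f, cur)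
    = ((List.range L).map (fun k => f k ++ PySem.List.slice (PySem.List.pyGetD cur (k : Int) [])
        (some (k : Int)) (some (((cur.headD []).length : Int) - 1 - (k : Int)))), pvRotate cur) := by
  show ((((PySem.List.enumerate ((List.range L).map f) 0).foldl
      (fun (s : List (List Int) × Int × Int) il =>
        (s.1 ++ [il.2 ++ PySem.List.slice (PySem.List.pyGetD cur il.1 []) (some s.2.1) (some s.2.2)],
         s.2.1 + 1, s.2.2 - 1))
      (([] : List (List Int)), (0 : Int), ((cur.headD []).length : Int) - 1))).1, pvRotate cur) = _
  rw [pv_inner_fold cur L f 0 0 (((cur.headD []).length : Int) - 1) []]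
  simp only [List.nil_append, zero_add]

lemma pv_main (M : List (List Int)) (hp : Pre_matrix_to_layers M) :
    matrix_to_layers M = matrix_to_layers_alt M := by
  obtain ⟨hne, hn0, hrows⟩ := hp
  have hm0 : 0 < M.length := List.length_pos_iff.2 hne
  set m := M.length with hm
  set n := (M.headD []).length with hn
  set L := Nat.min m n / 2 with hLd
  -- rotation characterizations
  have hM1 : pvRotate M = (List.range n).map (fun x => (List.range m).map (fun j => pvEnt M j (n - 1 - x))) :=
    pv_rotate_eq M
  have hlen1 : (pvRotate M).length = n := by rw [hM1]; simp
  have hhead1 : ((pvRotate M).headD []).length = m := by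
    rw [hM1, pv_headD_map_range _ _ hn0]; simp
  have hget1 : ∀ k, k < n → (pvRotate M).getD k [] = (List.range m).map (fun j => pvEnt M j (n - 1 - k)) := by
    intro k hk; rw [hM1, PySem.List.getD_map_range _ _ _ _ hk]
  have hM2 : pvRotate (pvRotate M)
      = (List.range m).map (fun x => (List.range n).map (fun j => pvEnt M (m - 1 - x) (n - 1 - j))) := by
    rw [pv_rotate_eq (pvRotate M), hhead1, hlen1]
    apply List.map_congr_left; intro x hx
    simp only [List.mem_range] at hx
    apply List.map_congr_left; intro j hj
    simp only [List.mem_range] at hj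
    show pvEnt (pvRotate M) j (m - 1 - x) = pvEnt M (m - 1 - x) (n - 1 - j)
    unfold pvEnt
    rw [hget1 j hj, PySem.List.getD_map_range _ _ _ _ (show m - 1 - x < m by omega)]
    rfl
  have hlen2 : (pvRotate (pvRotate M)).length = m := by rw [hM2]; simp
  have hhead2 : ((pvRotate (pvRotate M)).headD []).length = n := by
    rw [hM2, pv_headD_map_range _ _ hm0]; simp
  have hget2 : ∀ k, k < m → (pvRotate (pvRotate M)).getD k []
      = (List.range n).map (fun j => pvEnt M (m - 1 - k) (n - 1 - j)) := by
    intro k hk; rw [hM2, PySem.List.getD_map_range _ _ _ _ hk]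
  have hM3 : pvRotate (pvRotate (pvRotate M))
      = (List.range n).map (fun x => (List.range m).map (fun j => pvEnt M (m - 1 - j) x)) := by
    rw [pv_rotate_eq (pvRotate (pvRotate M)), hhead2, hlen2]
    apply List.map_congr_left; intro x hx
    simp only [List.mem_range] at hx
    apply List.map_congr_left; intro j hj
    simp only [List.mem_range] at hj
    show pvEnt (pvRotate (pvRotate M)) j (n - 1 - x) = pvEnt M (m - 1 - j) x
    unfold pvEnt
    rw [hget2 j hj, PySem.List.getD_map_range _ _ _ _ (show n - 1 - x < n by omega)]
    show pvEnt M (m - 1 - j) (n - 1 - (n - 1 - x)) = _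
    congr 1
    omega
  have hhead3 : ((pvRotate (pvRotate (pvRotate M))).headD []).length = m := by
    rw [hM3, pv_headD_map_range _ _ hn0]; simp
  have hget3 : ∀ k, k < n → (pvRotate (pvRotate (pvRotate M))).getD k []
      = (List.range m).map (fun j => pvEnt M (m - 1 - j) k) := by
    intro k hk; rw [hM3, PySem.List.getD_map_range _ _ _ _ hk]
  -- unfold A to four passes
  have hA : matrix_to_layers M = (pvPass (pvPass (pvPass (pvPass (List.replicate L ([] : List Int), M))))).1 := rfl
  have h0 : List.replicate L ([] : List Int) = (List.range L).map (fun _ => ([] : List Int)) := by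
    rw [show (fun (_ : Nat) => ([] : List Int)) = Function.const Nat ([] : List Int) from rfl,
      List.map_const, List.length_range]
  rw [hA, h0, pv_pass_eq, pv_pass_eq, pv_pass_eq, pv_pass_eq]
  simp only [hhead1, hhead2, hhead3]
  rw [show matrix_to_layers_alt M = [] ++ (List.range L).map (fun i =>
      (((List.range' i ((n - 1 - i) - i)).map (fun c => (M.getD i []).getD c 0)
        ++ (List.range' i ((m - 1 - i) - i)).map (fun row => (M.getD row []).getD (n - 1 - i) 0))
        ++ ((List.range' (i + 1) ((n - 1 - i + 1) - (i + 1))).reverse).map (fun c => (M.getD (m - 1 - i) []).getD c 0))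
        ++ ((List.range' (i + 1) ((m - 1 - i + 1) - (i + 1))).reverse).map (fun row => (M.getD row []).getD i 0))
    from PySem.List.foldl_append_singleton_eq_map _ _ _]
  simp only [List.nil_append]
  apply List.map_congr_left
  intro i hi
  simp only [List.mem_range] at hi
  have hbound : 2 * i + 2 ≤ m ∧ 2 * i + 2 ≤ n := by
    have h1 : 2 * L ≤ Nat.min m n := by rw [hLd]; omega
    have h2 : Nat.min m n ≤ m := Nat.min_le_left _ _
    have h3 : Nat.min m n ≤ n := Nat.min_le_right _ _
    omega
  have hrowlen : ∀ j, j < m → n ≤ (M.getD j []).length := by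
    intro j hj
    refine hrows _ ?_
    rw [List.getD_eq_getElem M [] hj]
    exact List.getElem_mem _
  have hs0 : PySem.List.slice (PySem.List.pyGetD M (i : Int) []) (some (i : Int))
        (some (((M.headD []).length : Int) - 1 - (i : Int)))
      = (List.range' i ((n - 1 - i) - i)).map (fun c => (M.getD i []).getD c 0) := by
    rw [PySem.List.pyGetD_natCast,
      show ((M.headD []).length : Int) - 1 - (i : Int) = ((n - 1 - i : Nat) : Int) by rw [← hn]; omega,
      PySem.List.slice_natCast]
    exact pv_rowSeg _ _ _ (by have := hrowlen i (by omega); omega)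
  have hs1 : PySem.List.slice (PySem.List.pyGetD (pvRotate M) (i : Int) []) (some (i : Int))
        (some ((m : Int) - 1 - (i : Int)))
      = (List.range' i ((m - 1 - i) - i)).map (fun row => (M.getD row []).getD (n - 1 - i) 0) := by
    rw [PySem.List.pyGetD_natCast, hget1 i (by omega),
      show (m : Int) - 1 - (i : Int) = ((m - 1 - i : Nat) : Int) by omega,
      PySem.List.slice_natCast,
      pv_rowSeg _ _ _ (by simp only [List.length_map, List.length_range]; omega)]
    apply List.map_congr_left
    intro c hc
    obtain ⟨t, ht, rfl⟩ := List.mem_range'.1 hc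
    rw [PySem.List.getD_map_range _ _ _ _ (show i + 1 * t < m by omega)]
    rfl
  have hs2 : PySem.List.slice (PySem.List.pyGetD (pvRotate (pvRotate M)) (i : Int) []) (some (i : Int))
        (some ((n : Int) - 1 - (i : Int)))
      = ((List.range' (i + 1) ((n - 1 - i + 1) - (i + 1))).reverse).map
          (fun c => (M.getD (m - 1 - i) []).getD c 0) := by
    rw [PySem.List.pyGetD_natCast, hget2 i (by omega),
      show (n : Int) - 1 - (i : Int) = ((n - 1 - i : Nat) : Int) by omega,
      PySem.List.slice_natCast,
      pv_rowSeg _ _ _ (by simp only [List.length_map, List.length_range]; omega)]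
    have hmid : (List.range' i ((n - 1 - i) - i)).map
          (fun c => ((List.range n).map (fun j => pvEnt M (m - 1 - i) (n - 1 - j))).getD c 0)
        = (List.range' i ((n - 1 - i) - i)).map (fun c => pvEnt M (m - 1 - i) (n - 1 - c)) := by
      apply List.map_congr_left
      intro c hc
      obtain ⟨t, ht, rfl⟩ := List.mem_range'.1 hc
      rw [PySem.List.getD_map_range _ _ _ _ (show i + 1 * t < n by omega)]
    rw [hmid, pv_revSeg (fun y => pvEnt M (m - 1 - i) y) ((n - 1 - i) - i) i (n - 1) (by omega),
      List.map_reverse,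
      show n - 1 + 1 - i - ((n - 1 - i) - i) = i + 1 by omega,
      show (n - 1 - i + 1) - (i + 1) = (n - 1 - i) - i by omega]
    rfl
  have hs3 : PySem.List.slice (PySem.List.pyGetD (pvRotate (pvRotate (pvRotate M))) (i : Int) []) (some (i : Int))
        (some ((m : Int) - 1 - (i : Int)))
      = ((List.range' (i + 1) ((m - 1 - i + 1) - (i + 1))).reverse).map
          (fun row => (M.getD row []).getD i 0) := by
    rw [PySem.List.pyGetD_natCast, hget3 i (by omega),
      show (m : Int) - 1 - (i : Int) = ((m - 1 - i : Nat) : Int) by omega,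
      PySem.List.slice_natCast,
      pv_rowSeg _ _ _ (by simp only [List.length_map, List.length_range]; omega)]
    have hmid : (List.range' i ((m - 1 - i) - i)).map
          (fun c => ((List.range m).map (fun j => pvEnt M (m - 1 - j) i)).getD c 0)
        = (List.range' i ((m - 1 - i) - i)).map (fun c => pvEnt M (m - 1 - c) i) := by
      apply List.map_congr_left
      intro c hc
      obtain ⟨t, ht, rfl⟩ := List.mem_range'.1 hc
      rw [PySem.List.getD_map_range _ _ _ _ (show i + 1 * t < m by omega)]
    rw [hmid, pv_revSeg (fun y => pvEnt M y i) ((m - 1 - i) - i) i (m - 1) (by omega),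
      List.map_reverse,
      show m - 1 + 1 - i - ((m - 1 - i) - i) = i + 1 by omega,
      show (m - 1 - i + 1) - (i + 1) = (m - 1 - i) - i by omega]
    rfl
  rw [hs0, hs1, hs2, hs3]

-- ===== VERDICT (by name: the statement is the Claim_ definition above) =====
theorem matrix_to_layers_spec : Claim_equal_matrix_to_layers := by
  intro M _ hp
  unfold Spec_matrix_to_layers
  exact pv_main M hp
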